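-- pv_equiv track=rewrite | github.com/ThomasScialom/T0_continual_learning | t0_continual_learning/metric_scorer.py | areMetricsDone
-- ===== SOURCE A (Python) =====
-- def areMetricsDone(metrics, dict_res):
--   all_metric_done = True
--
--   for metric in metrics:
--     if metric == 'rouge' and 'rouge1' not in dict_res:
--       all_metric_done = False
--     if metric == 'bleu' and 'bleu' not in dict_res:
--       all_metric_done = False
--     if metric == 'constrain_contain' and 'contain' not in dict_res:
--       all_metric_done = False
--     if metric == 'constrain_end' and 'end' not in dict_res:
--       all_metric_done = False
--     if metric == 'constrain_start' and 'start' not in dict_res: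
--       all_metric_done = False
--     if metric == 'accuracy' and 'accuracy' not in dict_res:
--       all_metric_done = False
--     if metric == 'sari' and 'sari' not in dict_res:
--       all_metric_done = False
--     if metric == 'haikuMetric' and 'comma' not in dict_res:
--       all_metric_done = False
--     if metric == 'firstWordSim' and 'jensenFirstToken' not in dict_res:
--       all_metric_done = False
--
--   return all_metric_done
-- ===== SOURCE B (Python) =====
-- _TABLE = [
--     ('rouge', 'rouge1'),
--     ('bleu', 'bleu'),
--     ('constrain_contain', 'contain'),
--     ('constrain_end', 'end'),
--     ('constrain_start', 'start'),
--     ('accuracy', 'accuracy'),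
--     ('sari', 'sari'),
--     ('haikuMetric', 'comma'),
--     ('firstWordSim', 'jensenFirstToken'),
-- ]
--
-- def areMetricsDone(metrics, dict_res):
--   requested = set(metrics)
--   required = {key for name, key in _TABLE if name in requested}
--   return required <= set(dict_res)
-- ===== Notes on version B (the rewrite author's own statement) =====
-- stated objective: alternative
-- what changed: Inverts the traversal: instead of scanning metrics and testing each against nine hard-coded equality guards, B builds the set of requested metrics, iterates over the fixed metric-to-key table to collect the set of required result keys, and returns a single set-inclusion test 'required <= set(dict_res)'.
import Mathlib
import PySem

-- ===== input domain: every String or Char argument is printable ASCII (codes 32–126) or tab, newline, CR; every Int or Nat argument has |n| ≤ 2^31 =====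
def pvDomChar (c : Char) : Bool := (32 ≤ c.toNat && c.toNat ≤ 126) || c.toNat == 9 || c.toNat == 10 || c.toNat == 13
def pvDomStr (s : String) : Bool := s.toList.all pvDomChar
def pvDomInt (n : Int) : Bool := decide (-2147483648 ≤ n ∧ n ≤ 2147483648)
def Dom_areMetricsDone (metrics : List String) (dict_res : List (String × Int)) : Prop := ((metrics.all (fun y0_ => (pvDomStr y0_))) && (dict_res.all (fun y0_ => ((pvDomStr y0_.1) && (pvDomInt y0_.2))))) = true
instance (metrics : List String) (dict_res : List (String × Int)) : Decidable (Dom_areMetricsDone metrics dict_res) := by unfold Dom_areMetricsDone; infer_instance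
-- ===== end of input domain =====

-- B inverts the traversal: it iterates over the fixed metric→key table (not over metrics) and
-- reduces the check to one set inclusion 'required ⊆ keys(dict_res)'; objective: alternative.

-- ===== PORT A =====
-- 'key in dict_res' (dict key membership) ported as an any-scan over the association list's keys.
def pvHasKey (dict_res : List (String × Int)) (k : String) : Bool :=
  dict_res.any (fun kv => kv.1 == k)

-- loop body of A: the nine independent equality-guarded assignments to all_metric_done
def pvStepA (dict_res : List (String × Int)) (acc : Bool) (metric : String) : Bool :=
  let acc := if metric == "rouge" && !(pvHasKey dict_res "rouge1") then false else acc
  let acc := if metric == "bleu" && !(pvHasKey dict_res "bleu") then false else acc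
  let acc := if metric == "constrain_contain" && !(pvHasKey dict_res "contain") then false else acc
  let acc := if metric == "constrain_end" && !(pvHasKey dict_res "end") then false else acc
  let acc := if metric == "constrain_start" && !(pvHasKey dict_res "start") then false else acc
  let acc := if metric == "accuracy" && !(pvHasKey dict_res "accuracy") then false else acc
  let acc := if metric == "sari" && !(pvHasKey dict_res "sari") then false else acc
  let acc := if metric == "haikuMetric" && !(pvHasKey dict_res "comma") then false else acc
  let acc := if metric == "firstWordSim" && !(pvHasKey dict_res "jensenFirstToken") then false else acc
  acc

def areMetricsDone (metrics : List String) (dict_res : List (String × Int)) : Bool :=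
  metrics.foldl (pvStepA dict_res) true

-- ===== PORT B =====
-- the module-level table _TABLE of Source B
def pvTable : List (String × String) :=
  [("rouge", "rouge1"), ("bleu", "bleu"), ("constrain_contain", "contain"),
   ("constrain_end", "end"), ("constrain_start", "start"), ("accuracy", "accuracy"),
   ("sari", "sari"), ("haikuMetric", "comma"), ("firstWordSim", "jensenFirstToken")]

def areMetricsDone_alt (metrics : List String) (dict_res : List (String × Int)) : Bool :=
  -- requested = set(metrics)
  let requested : PySem.Set String := PySem.Set.ofList metrics
  -- required = {key for name, key in _TABLE if name in requested}
  let required : PySem.Set String :=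
    PySem.Set.ofList ((pvTable.filter (fun p => PySem.Set.contains requested p.1)).map Prod.snd)
  -- required <= set(dict_res)   (set(dict) = the dict's key set)
  PySem.Set.issubset required (PySem.Set.ofList (dict_res.map Prod.fst))

-- ===== PRECONDITION & SPEC =====
def Spec_areMetricsDone (metrics : List String) (dict_res : List (String × Int)) (out : Bool) : Prop := out = areMetricsDone_alt metrics dict_res
instance (metrics : List String) (dict_res : List (String × Int)) (out : Bool) : Decidable (Spec_areMetricsDone metrics dict_res out) := by unfold Spec_areMetricsDone; infer_instance

-- ===== CLAIM (what is proved, stated in full; the proofs are below) =====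
def Claim_equal_areMetricsDone : Prop := ∀ (metrics : List String) (dict_res : List (String × Int)), Dom_areMetricsDone metrics dict_res → Spec_areMetricsDone metrics dict_res (areMetricsDone metrics dict_res)

-- ===== LEMMAS AND PROOFS =====
-- per-metric characterisation of A's loop body
def pvCheckB (dict_res : List (String × Int)) (m : String) : Bool :=
  match pvTable.lookup m with
  | none => true
  | some k => pvHasKey dict_res k

-- A's loop body is 'and the current flag with the per-metric check'
theorem pvStepA_eq (dict_res : List (String × Int)) (acc : Bool) (m : String) :
    pvStepA dict_res acc m = (acc && pvCheckB dict_res m) := by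
  by_cases h1 : m = "rouge"
  · subst h1; simp [pvStepA, pvCheckB, pvTable]; cases pvHasKey dict_res "rouge1" <;> simp
  by_cases h2 : m = "bleu"
  · subst h2; simp [pvStepA, pvCheckB, pvTable, List.lookup]; cases pvHasKey dict_res "bleu" <;> simp
  by_cases h3 : m = "constrain_contain"
  · subst h3; simp [pvStepA, pvCheckB, pvTable, List.lookup]; cases pvHasKey dict_res "contain" <;> simp
  by_cases h4 : m = "constrain_end"
  · subst h4; simp [pvStepA, pvCheckB, pvTable, List.lookup]; cases pvHasKey dict_res "end" <;> simp
  by_cases h5 : m = "constrain_start"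
  · subst h5; simp [pvStepA, pvCheckB, pvTable, List.lookup]; cases pvHasKey dict_res "start" <;> simp
  by_cases h6 : m = "accuracy"
  · subst h6; simp [pvStepA, pvCheckB, pvTable, List.lookup]; cases pvHasKey dict_res "accuracy" <;> simp
  by_cases h7 : m = "sari"
  · subst h7; simp [pvStepA, pvCheckB, pvTable, List.lookup]; cases pvHasKey dict_res "sari" <;> simp
  by_cases h8 : m = "haikuMetric"
  · subst h8; simp [pvStepA, pvCheckB, pvTable, List.lookup]; cases pvHasKey dict_res "comma" <;> simp
  by_cases h9 : m = "firstWordSim"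
  · subst h9; simp [pvStepA, pvCheckB, pvTable, List.lookup]; cases pvHasKey dict_res "jensenFirstToken" <;> simp
  · simp only [pvStepA, pvCheckB, pvTable, List.lookup,
      beq_eq_false_iff_ne.mpr h1, beq_eq_false_iff_ne.mpr h2, beq_eq_false_iff_ne.mpr h3,
      beq_eq_false_iff_ne.mpr h4, beq_eq_false_iff_ne.mpr h5, beq_eq_false_iff_ne.mpr h6,
      beq_eq_false_iff_ne.mpr h7, beq_eq_false_iff_ne.mpr h8, beq_eq_false_iff_ne.mpr h9,
      Bool.false_and, Bool.if_false_left]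
    simp

theorem pvFold_eq (dict_res : List (String × Int)) (metrics : List String) (acc : Bool) :
    metrics.foldl (pvStepA dict_res) acc = (acc && metrics.all (pvCheckB dict_res)) := by
  induction metrics generalizing acc with
  | nil => simp
  | cons m rest ih =>
      simp only [List.foldl_cons, List.all_cons, pvStepA_eq, ih, Bool.and_assoc]

theorem pvHasKey_iff (dict_res : List (String × Int)) (k : String) :
    pvHasKey dict_res k = true ↔ ∃ a ∈ dict_res, a.1 = k := by
  simp [pvHasKey]

-- the two quantifications (over metrics vs over the table) describe the same condition
theorem pvAll_iff (dict_res : List (String × Int)) (metrics : List String) :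
    (∀ m ∈ metrics, pvCheckB dict_res m = true)
      ↔ (∀ p ∈ pvTable, p.1 ∈ metrics → pvHasKey dict_res p.2 = true) := by
  constructor
  · intro h p hp hm
    have hc := h p.1 hm
    simp only [pvTable, List.mem_cons, List.not_mem_nil, or_false] at hp
    rcases hp with rfl | rfl | rfl | rfl | rfl | rfl | rfl | rfl | rfl <;>
      simpa [pvCheckB, pvTable, List.lookup] using hc
  · intro h m hm
    by_cases h1 : m = "rouge"
    · subst h1; simpa [pvCheckB, pvTable, List.lookup] using h ("rouge", "rouge1") (by simp [pvTable]) hm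
    by_cases h2 : m = "bleu"
    · subst h2; simpa [pvCheckB, pvTable, List.lookup] using h ("bleu", "bleu") (by simp [pvTable]) hm
    by_cases h3 : m = "constrain_contain"
    · subst h3; simpa [pvCheckB, pvTable, List.lookup] using h ("constrain_contain", "contain") (by simp [pvTable]) hm
    by_cases h4 : m = "constrain_end"
    · subst h4; simpa [pvCheckB, pvTable, List.lookup] using h ("constrain_end", "end") (by simp [pvTable]) hm
    by_cases h5 : m = "constrain_start"
    · subst h5; simpa [pvCheckB, pvTable, List.lookup] using h ("constrain_start", "start") (by simp [pvTable]) hm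
    by_cases h6 : m = "accuracy"
    · subst h6; simpa [pvCheckB, pvTable, List.lookup] using h ("accuracy", "accuracy") (by simp [pvTable]) hm
    by_cases h7 : m = "sari"
    · subst h7; simpa [pvCheckB, pvTable, List.lookup] using h ("sari", "sari") (by simp [pvTable]) hm
    by_cases h8 : m = "haikuMetric"
    · subst h8; simpa [pvCheckB, pvTable, List.lookup] using h ("haikuMetric", "comma") (by simp [pvTable]) hm
    by_cases h9 : m = "firstWordSim"
    · subst h9; simpa [pvCheckB, pvTable, List.lookup] using h ("firstWordSim", "jensenFirstToken") (by simp [pvTable]) hm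
    · simp only [pvCheckB, pvTable, List.lookup,
        beq_eq_false_iff_ne.mpr h1, beq_eq_false_iff_ne.mpr h2, beq_eq_false_iff_ne.mpr h3,
        beq_eq_false_iff_ne.mpr h4, beq_eq_false_iff_ne.mpr h5, beq_eq_false_iff_ne.mpr h6,
        beq_eq_false_iff_ne.mpr h7, beq_eq_false_iff_ne.mpr h8, beq_eq_false_iff_ne.mpr h9]

-- characterisation of B as the table-side quantification
theorem pvAlt_iff (dict_res : List (String × Int)) (metrics : List String) :
    areMetricsDone_alt metrics dict_res = true
      ↔ (∀ p ∈ pvTable, p.1 ∈ metrics → pvHasKey dict_res p.2 = true) := by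
  simp only [areMetricsDone_alt, PySem.Set.issubset_iff, PySem.Set.mem_ofList,
    List.mem_map, List.mem_filter, PySem.Set.contains_iff]
  simp only [pvHasKey_iff]
  constructor
  · intro h p hp hm
    exact h p.2 ⟨p, ⟨hp, hm⟩, rfl⟩
  · rintro h k ⟨p, ⟨hp, hm⟩, rfl⟩
    exact h p hp hm

-- ===== VERDICT (by name: the statement is the Claim_ definition above) =====
theorem areMetricsDone_spec : Claim_equal_areMetricsDone := by
  intro metrics dict_res _
  show areMetricsDone metrics dict_res = areMetricsDone_alt metrics dict_res
  rw [areMetricsDone, pvFold_eq, Bool.true_and, Bool.eq_iff_iff, List.all_eq_true,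
    pvAll_iff, pvAlt_iff]
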